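-- pv_equiv track=rewrite | github.com/nikhilgiri301/soil_k_analysis | 17_development_scripts/core_scripts/stage_4_5_chunk_extractors/stage_4_5_chunk2_temporal_extractor.py | _categorize_timeframe
-- ===== SOURCE A (Python) =====
-- def _categorize_timeframe(temporal_relevance: str) -> str:
--     """Categorize temporal relevance into timeframe buckets"""
--     relevance_lower = temporal_relevance.lower()
--
--     if 'seasonal' in relevance_lower or 'monthly' in relevance_lower:
--         return 'seasonal'
--     elif 'annual' in relevance_lower or '1 year' in relevance_lower:
--         return 'annual'
--     elif any(term in relevance_lower for term in ['2-5 year', '2 to 5', 'medium-term', 'medium term']):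
--         return '2-5_years'
--     elif any(term in relevance_lower for term in ['5-15 year', '5 to 15', '10 year', 'decade']):
--         return '5-15_years'
--     elif any(term in relevance_lower for term in ['15+ year', '15 year', 'long-term', 'long term', 'decadal']):
--         return '15+_years'
--     else:
--         return 'unspecified'
-- ===== SOURCE B (Python) =====
-- # Different algorithm: instead of an ordered first-match chain of substring tests,
-- # scan every position of the lowered string once and keep the MINIMUM priority of
-- # any term that starts there; map the final minimum to its bucket.
-- _TERMS = [
--     ('seasonal', 0), ('monthly', 0),
--     ('annual', 1), ('1 year', 1),
--     ('2-5 year', 2), ('2 to 5', 2), ('medium-term', 2), ('medium term', 2),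
--     ('5-15 year', 3), ('5 to 15', 3), ('10 year', 3), ('decade', 3),
--     ('15+ year', 4), ('15 year', 4), ('long-term', 4), ('long term', 4), ('decadal', 4),
-- ]
-- _BUCKETS = ['seasonal', 'annual', '2-5_years', '5-15_years', '15+_years', 'unspecified']
--
-- def _categorize_timeframe(temporal_relevance: str) -> str:
--     low = temporal_relevance.lower()
--     best = 5
--     for i in range(len(low)):
--         for term, p in _TERMS:
--             if p < best and low.startswith(term, i):
--                 best = p
--     return _BUCKETS[best]
-- ===== Notes on version B (the rewrite author's own statement) =====
-- stated objective: alternative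
-- what changed: Replaces A's ordered first-match chain of whole-string substring tests with a single positional scan that keeps the minimum priority of any keyword starting at each position, then maps that minimum to its bucket; correct because A's answer is exactly the smallest-priority category matched anywhere.
import Mathlib
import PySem

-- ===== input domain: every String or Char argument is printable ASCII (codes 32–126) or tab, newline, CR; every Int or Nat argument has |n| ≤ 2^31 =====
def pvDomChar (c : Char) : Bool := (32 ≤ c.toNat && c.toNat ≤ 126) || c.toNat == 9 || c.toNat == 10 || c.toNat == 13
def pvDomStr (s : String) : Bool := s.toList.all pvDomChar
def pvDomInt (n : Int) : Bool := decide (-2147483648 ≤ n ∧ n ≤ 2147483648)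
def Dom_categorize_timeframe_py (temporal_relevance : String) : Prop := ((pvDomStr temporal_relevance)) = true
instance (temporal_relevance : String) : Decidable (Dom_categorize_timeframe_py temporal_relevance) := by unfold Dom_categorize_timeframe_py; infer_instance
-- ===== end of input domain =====

-- B replaces A's ordered first-match chain of whole-string substring tests with one positional
-- scan keeping the minimum matched priority, mapped to its bucket at the end (alternative, same cost).

-- ===== PORT A =====
def categorize_timeframe_py (temporal_relevance : String) : String :=
  let relevance_lower := PySem.Str.lower temporal_relevance
  if PySem.Str.isIn "seasonal" relevance_lower || PySem.Str.isIn "monthly" relevance_lower then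
    "seasonal"
  else if PySem.Str.isIn "annual" relevance_lower || PySem.Str.isIn "1 year" relevance_lower then
    "annual"
  else if ["2-5 year", "2 to 5", "medium-term", "medium term"].any
      (fun term => PySem.Str.isIn term relevance_lower) then
    "2-5_years"
  else if ["5-15 year", "5 to 15", "10 year", "decade"].any
      (fun term => PySem.Str.isIn term relevance_lower) then
    "5-15_years"
  else if ["15+ year", "15 year", "long-term", "long term", "decadal"].any
      (fun term => PySem.Str.isIn term relevance_lower) then
    "15+_years"
  else
    "unspecified"

-- ===== PORT B =====
def pvTerms : List (List Char × Nat) :=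
  [("seasonal".toList, 0), ("monthly".toList, 0),
   ("annual".toList, 1), ("1 year".toList, 1),
   ("2-5 year".toList, 2), ("2 to 5".toList, 2), ("medium-term".toList, 2), ("medium term".toList, 2),
   ("5-15 year".toList, 3), ("5 to 15".toList, 3), ("10 year".toList, 3), ("decade".toList, 3),
   ("15+ year".toList, 4), ("15 year".toList, 4), ("long-term".toList, 4), ("long term".toList, 4),
   ("decadal".toList, 4)]

def pvBuckets : List String :=
  ["seasonal", "annual", "2-5_years", "5-15_years", "15+_years", "unspecified"]

-- minimum priority of any term starting at any position of low (5 if none)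
-- (Python's low.startswith(term, i) for 0 ≤ i is startswith of (low.drop i))
def pvBest (low : List Char) : Nat :=
  (PySem.List.pyRange 0 (low.length : Int) 1).foldl
    (fun b i => pvTerms.foldl
      (fun b p => if p.2 < b && PySem.Chars.startswith (low.drop i.toNat) p.1 then p.2 else b) b) 5

def categorize_timeframe_py_alt (temporal_relevance : String) : String :=
  pvBuckets.getD (pvBest (PySem.Chars.lower temporal_relevance.toList)) "unspecified"

-- ===== PRECONDITION & SPEC =====
def Spec_categorize_timeframe_py (temporal_relevance : String) (out : String) : Prop := out = categorize_timeframe_py_alt temporal_relevance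
instance (temporal_relevance : String) (out : String) : Decidable (Spec_categorize_timeframe_py temporal_relevance out) := by unfold Spec_categorize_timeframe_py; infer_instance

-- ===== CLAIM (what is proved, stated in full; the proofs are below) =====
def Claim_equal_categorize_timeframe_py : Prop := ∀ (temporal_relevance : String), Dom_categorize_timeframe_py temporal_relevance → Spec_categorize_timeframe_py temporal_relevance (categorize_timeframe_py temporal_relevance)

-- ===== LEMMAS AND PROOFS =====

-- generic foldl facts specialised to Nat accumulators
lemma pv_foldl_le {α : Type} (f : Nat → α → Nat) (h : ∀ b x, f b x ≤ b) :
    ∀ (l : List α) (b : Nat), l.foldl f b ≤ b := by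
  intro l
  induction l with
  | nil => intro b; exact Nat.le_refl b
  | cons x xs ih => intro b; exact Nat.le_trans (ih (f b x)) (h b x)

lemma pv_foldl_le_of_mem {α : Type} (f : Nat → α → Nat) (h : ∀ b x, f b x ≤ b)
    (c : Nat) (x : α) (hx : ∀ b, f b x ≤ c) :
    ∀ (l : List α) (b : Nat), x ∈ l → l.foldl f b ≤ c := by
  intro l
  induction l with
  | nil => intro b hmem; cases hmem
  | cons y ys ih =>
    intro b hmem
    rcases List.mem_cons.mp hmem with rfl | hmem'
    · exact Nat.le_trans (pv_foldl_le f h ys (f b x)) (hx b)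
    · exact ih (f b y) hmem'

lemma pv_foldl_inv {α : Type} (f : Nat → α → Nat) (P : Nat → Prop) :
    ∀ (l : List α) (b : Nat), (∀ b x, x ∈ l → P b → P (f b x)) → P b → P (l.foldl f b) := by
  intro l
  induction l with
  | nil => intro b _ hb; exact hb
  | cons x xs ih =>
    intro b hstep hb
    exact ih (f b x) (fun b' y hy => hstep b' y (List.mem_cons_of_mem x hy))
      (hstep b x (List.mem_cons_self) hb)

-- the inner step only ever decreases the accumulator
lemma pv_inner_step_le (low : List Char) (i : Int) :
    ∀ (b : Nat) (p : List Char × Nat),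
      (if p.2 < b && PySem.Chars.startswith (low.drop i.toNat) p.1 then p.2 else b) ≤ b := by
  intro b p
  by_cases hc : (p.2 < b && PySem.Chars.startswith (low.drop i.toNat) p.1) = true
  · rw [if_pos hc]
    simp only [Bool.and_eq_true, decide_eq_true_eq] at hc
    exact Nat.le_of_lt hc.1
  · rw [if_neg hc]

lemma pv_outer_step_le (low : List Char) :
    ∀ (b : Nat) (i : Int),
      (pvTerms.foldl (fun b p => if p.2 < b && PySem.Chars.startswith (low.drop i.toNat) p.1 then p.2 else b) b) ≤ b := by
  intro b i
  exact pv_foldl_le _ (pv_inner_step_le low i) pvTerms b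

-- if some term of pvTerms occurs in low, pvBest is at most its priority
lemma pv_best_le (low t : List Char) (p : Nat)
    (hmem : (t, p) ∈ pvTerms) (hne : t ≠ [])
    (hin : PySem.Chars.isIn t low = true) : pvBest low ≤ p := by
  obtain ⟨j, hj⟩ := (PySem.Chars.exists_prefix_drop_iff_isIn t low).mpr hin
  have hjlen : j < low.length := by
    have h1 : t.length ≤ (low.drop j).length := hj.length_le
    have h2 : (low.drop j).length = low.length - j := List.length_drop
    have h3 : 0 < t.length := List.length_pos_iff.mpr hne
    omega
  have hmemr : (j : Int) ∈ PySem.List.pyRange 0 (low.length : Int) 1 := by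
    rw [PySem.List.mem_pyRange_one]
    constructor
    · exact Int.natCast_nonneg j
    · exact_mod_cast hjlen
  have hsw : PySem.Chars.startswith (low.drop j) t = true :=
    (PySem.Chars.startswith_iff _ _).mpr hj
  apply pv_foldl_le_of_mem _ (pv_outer_step_le low) p ((j : Int)) _ _ 5 hmemr
  intro b
  apply pv_foldl_le_of_mem _ (pv_inner_step_le low (j : Int)) p (t, p) _ pvTerms b hmem
  intro b'
  by_cases hb : p < b'
  · simp [hb, hsw]
  · simp [hb]; omega

-- pvBest is 5 or the priority of some term that occurs in low
lemma pv_best_inv (low : List Char) :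
    pvBest low = 5 ∨ ∃ tp ∈ pvTerms, tp.2 = pvBest low ∧ PySem.Chars.isIn tp.1 low = true := by
  unfold pvBest
  apply pv_foldl_inv _ (fun b => b = 5 ∨ ∃ tp ∈ pvTerms, tp.2 = b ∧ PySem.Chars.isIn tp.1 low = true)
  · intro b i _ hb
    apply pv_foldl_inv _ (fun b => b = 5 ∨ ∃ tp ∈ pvTerms, tp.2 = b ∧ PySem.Chars.isIn tp.1 low = true)
    · intro b' p hp hb'
      by_cases hcond : (p.2 < b' && PySem.Chars.startswith (low.drop i.toNat) p.1) = true
      · simp only [hcond, if_true]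
        right
        refine ⟨p, hp, rfl, ?_⟩
        simp only [Bool.and_eq_true, decide_eq_true_eq] at hcond
        have hpre : p.1 <+: low.drop i.toNat := (PySem.Chars.startswith_iff _ _).mp hcond.2
        have hsuf : low.drop i.toNat <:+ low := List.drop_suffix _ _
        obtain ⟨r, hr⟩ := hpre
        obtain ⟨w, hw⟩ := hsuf
        apply (PySem.Chars.isIn_iff_infix p.1 low).mpr
        exact ⟨w, r, by rw [← hw, ← hr]; exact List.append_assoc w p.1 r⟩
      · rw [if_neg hcond]; exact hb'
    · exact hb
  · exact Or.inl rfl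

-- if every term of priority below k is absent (k ≤ 5), pvBest is at least k
lemma pv_best_ge (low : List Char) (k : Nat) (hk : k ≤ 5)
    (h : ∀ tp ∈ pvTerms, tp.2 < k → PySem.Chars.isIn tp.1 low = false) : k ≤ pvBest low := by
  rcases pv_best_inv low with h5 | ⟨tp, htp, hpv, hin⟩
  · omega
  · by_contra hlt
    have := h tp htp (by omega)
    rw [hin] at this
    cases this

-- ===== VERDICT (by name: the statement is the Claim_ definition above) =====
theorem categorize_timeframe_py_spec : Claim_equal_categorize_timeframe_py := by
  intro s _
  unfold Spec_categorize_timeframe_py categorize_timeframe_py categorize_timeframe_py_alt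
  by_cases h1 : PySem.Chars.isIn ['s', 'e', 'a', 's', 'o', 'n', 'a', 'l'] (PySem.Chars.lower s.toList) = true
  · have hb : pvBest (PySem.Chars.lower s.toList) = 0 :=
      Nat.le_zero.mp (pv_best_le _ _ 0 (by decide) (by decide) h1)
    simp [h1, hb, pvBuckets]
  rw [Bool.not_eq_true] at h1
  by_cases h2 : PySem.Chars.isIn ['m', 'o', 'n', 't', 'h', 'l', 'y'] (PySem.Chars.lower s.toList) = true
  · have hb : pvBest (PySem.Chars.lower s.toList) = 0 :=
      Nat.le_zero.mp (pv_best_le _ _ 0 (by decide) (by decide) h2)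
    simp [h1, h2, hb, pvBuckets]
  rw [Bool.not_eq_true] at h2
  by_cases h3 : PySem.Chars.isIn ['a', 'n', 'n', 'u', 'a', 'l'] (PySem.Chars.lower s.toList) = true
  · have hle := pv_best_le (PySem.Chars.lower s.toList) _ 1 (by decide) (by decide) h3
    have hge : 1 ≤ pvBest (PySem.Chars.lower s.toList) := by
      apply pv_best_ge _ 1 (by omega)
      intro tp htp hlt
      unfold pvTerms at htp
      simp only [List.mem_cons, List.not_mem_nil, or_false] at htp
      rcases htp with rfl|rfl|rfl|rfl|rfl|rfl|rfl|rfl|rfl|rfl|rfl|rfl|rfl|rfl|rfl|rfl|rfl|h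
      all_goals simp_all
    have hb : pvBest (PySem.Chars.lower s.toList) = 1 := by omega
    simp [h1, h2, h3, hb, pvBuckets]
  rw [Bool.not_eq_true] at h3
  by_cases h4 : PySem.Chars.isIn ['1', ' ', 'y', 'e', 'a', 'r'] (PySem.Chars.lower s.toList) = true
  · have hle := pv_best_le (PySem.Chars.lower s.toList) _ 1 (by decide) (by decide) h4
    have hge : 1 ≤ pvBest (PySem.Chars.lower s.toList) := by
      apply pv_best_ge _ 1 (by omega)
      intro tp htp hlt
      unfold pvTerms at htp
      simp only [List.mem_cons, List.not_mem_nil, or_false] at htp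
      rcases htp with rfl|rfl|rfl|rfl|rfl|rfl|rfl|rfl|rfl|rfl|rfl|rfl|rfl|rfl|rfl|rfl|rfl|h
      all_goals simp_all
    have hb : pvBest (PySem.Chars.lower s.toList) = 1 := by omega
    simp [h1, h2, h3, h4, hb, pvBuckets]
  rw [Bool.not_eq_true] at h4
  by_cases h5 : PySem.Chars.isIn ['2', '-', '5', ' ', 'y', 'e', 'a', 'r'] (PySem.Chars.lower s.toList) = true
  · have hle := pv_best_le (PySem.Chars.lower s.toList) _ 2 (by decide) (by decide) h5
    have hge : 2 ≤ pvBest (PySem.Chars.lower s.toList) := by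
      apply pv_best_ge _ 2 (by omega)
      intro tp htp hlt
      unfold pvTerms at htp
      simp only [List.mem_cons, List.not_mem_nil, or_false] at htp
      rcases htp with rfl|rfl|rfl|rfl|rfl|rfl|rfl|rfl|rfl|rfl|rfl|rfl|rfl|rfl|rfl|rfl|rfl|h
      all_goals simp_all
    have hb : pvBest (PySem.Chars.lower s.toList) = 2 := by omega
    simp [h1, h2, h3, h4, h5, hb, pvBuckets]
  rw [Bool.not_eq_true] at h5
  by_cases h6 : PySem.Chars.isIn ['2', ' ', 't', 'o', ' ', '5'] (PySem.Chars.lower s.toList) = true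
  · have hle := pv_best_le (PySem.Chars.lower s.toList) _ 2 (by decide) (by decide) h6
    have hge : 2 ≤ pvBest (PySem.Chars.lower s.toList) := by
      apply pv_best_ge _ 2 (by omega)
      intro tp htp hlt
      unfold pvTerms at htp
      simp only [List.mem_cons, List.not_mem_nil, or_false] at htp
      rcases htp with rfl|rfl|rfl|rfl|rfl|rfl|rfl|rfl|rfl|rfl|rfl|rfl|rfl|rfl|rfl|rfl|rfl|h
      all_goals simp_all
    have hb : pvBest (PySem.Chars.lower s.toList) = 2 := by omega
    simp [h1, h2, h3, h4, h5, h6, hb, pvBuckets]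
  rw [Bool.not_eq_true] at h6
  by_cases h7 : PySem.Chars.isIn ['m', 'e', 'd', 'i', 'u', 'm', '-', 't', 'e', 'r', 'm'] (PySem.Chars.lower s.toList) = true
  · have hle := pv_best_le (PySem.Chars.lower s.toList) _ 2 (by decide) (by decide) h7
    have hge : 2 ≤ pvBest (PySem.Chars.lower s.toList) := by
      apply pv_best_ge _ 2 (by omega)
      intro tp htp hlt
      unfold pvTerms at htp
      simp only [List.mem_cons, List.not_mem_nil, or_false] at htp
      rcases htp with rfl|rfl|rfl|rfl|rfl|rfl|rfl|rfl|rfl|rfl|rfl|rfl|rfl|rfl|rfl|rfl|rfl|h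
      all_goals simp_all
    have hb : pvBest (PySem.Chars.lower s.toList) = 2 := by omega
    simp [h1, h2, h3, h4, h5, h6, h7, hb, pvBuckets]
  rw [Bool.not_eq_true] at h7
  by_cases h8 : PySem.Chars.isIn ['m', 'e', 'd', 'i', 'u', 'm', ' ', 't', 'e', 'r', 'm'] (PySem.Chars.lower s.toList) = true
  · have hle := pv_best_le (PySem.Chars.lower s.toList) _ 2 (by decide) (by decide) h8
    have hge : 2 ≤ pvBest (PySem.Chars.lower s.toList) := by
      apply pv_best_ge _ 2 (by omega)
      intro tp htp hlt
      unfold pvTerms at htp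
      simp only [List.mem_cons, List.not_mem_nil, or_false] at htp
      rcases htp with rfl|rfl|rfl|rfl|rfl|rfl|rfl|rfl|rfl|rfl|rfl|rfl|rfl|rfl|rfl|rfl|rfl|h
      all_goals simp_all
    have hb : pvBest (PySem.Chars.lower s.toList) = 2 := by omega
    simp [h1, h2, h3, h4, h5, h6, h7, h8, hb, pvBuckets]
  rw [Bool.not_eq_true] at h8
  by_cases h9 : PySem.Chars.isIn ['5', '-', '1', '5', ' ', 'y', 'e', 'a', 'r'] (PySem.Chars.lower s.toList) = true
  · have hle := pv_best_le (PySem.Chars.lower s.toList) _ 3 (by decide) (by decide) h9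
    have hge : 3 ≤ pvBest (PySem.Chars.lower s.toList) := by
      apply pv_best_ge _ 3 (by omega)
      intro tp htp hlt
      unfold pvTerms at htp
      simp only [List.mem_cons, List.not_mem_nil, or_false] at htp
      rcases htp with rfl|rfl|rfl|rfl|rfl|rfl|rfl|rfl|rfl|rfl|rfl|rfl|rfl|rfl|rfl|rfl|rfl|h
      all_goals simp_all
    have hb : pvBest (PySem.Chars.lower s.toList) = 3 := by omega
    simp [h1, h2, h3, h4, h5, h6, h7, h8, h9, hb, pvBuckets]
  rw [Bool.not_eq_true] at h9
  by_cases h10 : PySem.Chars.isIn ['5', ' ', 't', 'o', ' ', '1', '5'] (PySem.Chars.lower s.toList) = true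
  · have hle := pv_best_le (PySem.Chars.lower s.toList) _ 3 (by decide) (by decide) h10
    have hge : 3 ≤ pvBest (PySem.Chars.lower s.toList) := by
      apply pv_best_ge _ 3 (by omega)
      intro tp htp hlt
      unfold pvTerms at htp
      simp only [List.mem_cons, List.not_mem_nil, or_false] at htp
      rcases htp with rfl|rfl|rfl|rfl|rfl|rfl|rfl|rfl|rfl|rfl|rfl|rfl|rfl|rfl|rfl|rfl|rfl|h
      all_goals simp_all
    have hb : pvBest (PySem.Chars.lower s.toList) = 3 := by omega
    simp [h1, h2, h3, h4, h5, h6, h7, h8, h9, h10, hb, pvBuckets]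
  rw [Bool.not_eq_true] at h10
  by_cases h11 : PySem.Chars.isIn ['1', '0', ' ', 'y', 'e', 'a', 'r'] (PySem.Chars.lower s.toList) = true
  · have hle := pv_best_le (PySem.Chars.lower s.toList) _ 3 (by decide) (by decide) h11
    have hge : 3 ≤ pvBest (PySem.Chars.lower s.toList) := by
      apply pv_best_ge _ 3 (by omega)
      intro tp htp hlt
      unfold pvTerms at htp
      simp only [List.mem_cons, List.not_mem_nil, or_false] at htp
      rcases htp with rfl|rfl|rfl|rfl|rfl|rfl|rfl|rfl|rfl|rfl|rfl|rfl|rfl|rfl|rfl|rfl|rfl|h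
      all_goals simp_all
    have hb : pvBest (PySem.Chars.lower s.toList) = 3 := by omega
    simp [h1, h2, h3, h4, h5, h6, h7, h8, h9, h10, h11, hb, pvBuckets]
  rw [Bool.not_eq_true] at h11
  by_cases h12 : PySem.Chars.isIn ['d', 'e', 'c', 'a', 'd', 'e'] (PySem.Chars.lower s.toList) = true
  · have hle := pv_best_le (PySem.Chars.lower s.toList) _ 3 (by decide) (by decide) h12
    have hge : 3 ≤ pvBest (PySem.Chars.lower s.toList) := by
      apply pv_best_ge _ 3 (by omega)
      intro tp htp hlt
      unfold pvTerms at htp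
      simp only [List.mem_cons, List.not_mem_nil, or_false] at htp
      rcases htp with rfl|rfl|rfl|rfl|rfl|rfl|rfl|rfl|rfl|rfl|rfl|rfl|rfl|rfl|rfl|rfl|rfl|h
      all_goals simp_all
    have hb : pvBest (PySem.Chars.lower s.toList) = 3 := by omega
    simp [h1, h2, h3, h4, h5, h6, h7, h8, h9, h10, h11, h12, hb, pvBuckets]
  rw [Bool.not_eq_true] at h12
  by_cases h13 : PySem.Chars.isIn ['1', '5', '+', ' ', 'y', 'e', 'a', 'r'] (PySem.Chars.lower s.toList) = true
  · have hle := pv_best_le (PySem.Chars.lower s.toList) _ 4 (by decide) (by decide) h13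
    have hge : 4 ≤ pvBest (PySem.Chars.lower s.toList) := by
      apply pv_best_ge _ 4 (by omega)
      intro tp htp hlt
      unfold pvTerms at htp
      simp only [List.mem_cons, List.not_mem_nil, or_false] at htp
      rcases htp with rfl|rfl|rfl|rfl|rfl|rfl|rfl|rfl|rfl|rfl|rfl|rfl|rfl|rfl|rfl|rfl|rfl|h
      all_goals simp_all
    have hb : pvBest (PySem.Chars.lower s.toList) = 4 := by omega
    simp [h1, h2, h3, h4, h5, h6, h7, h8, h9, h10, h11, h12, h13, hb, pvBuckets]
  rw [Bool.not_eq_true] at h13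
  by_cases h14 : PySem.Chars.isIn ['1', '5', ' ', 'y', 'e', 'a', 'r'] (PySem.Chars.lower s.toList) = true
  · have hle := pv_best_le (PySem.Chars.lower s.toList) _ 4 (by decide) (by decide) h14
    have hge : 4 ≤ pvBest (PySem.Chars.lower s.toList) := by
      apply pv_best_ge _ 4 (by omega)
      intro tp htp hlt
      unfold pvTerms at htp
      simp only [List.mem_cons, List.not_mem_nil, or_false] at htp
      rcases htp with rfl|rfl|rfl|rfl|rfl|rfl|rfl|rfl|rfl|rfl|rfl|rfl|rfl|rfl|rfl|rfl|rfl|h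
      all_goals simp_all
    have hb : pvBest (PySem.Chars.lower s.toList) = 4 := by omega
    simp [h1, h2, h3, h4, h5, h6, h7, h8, h9, h10, h11, h12, h13, h14, hb, pvBuckets]
  rw [Bool.not_eq_true] at h14
  by_cases h15 : PySem.Chars.isIn ['l', 'o', 'n', 'g', '-', 't', 'e', 'r', 'm'] (PySem.Chars.lower s.toList) = true
  · have hle := pv_best_le (PySem.Chars.lower s.toList) _ 4 (by decide) (by decide) h15
    have hge : 4 ≤ pvBest (PySem.Chars.lower s.toList) := by
      apply pv_best_ge _ 4 (by omega)
      intro tp htp hlt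
      unfold pvTerms at htp
      simp only [List.mem_cons, List.not_mem_nil, or_false] at htp
      rcases htp with rfl|rfl|rfl|rfl|rfl|rfl|rfl|rfl|rfl|rfl|rfl|rfl|rfl|rfl|rfl|rfl|rfl|h
      all_goals simp_all
    have hb : pvBest (PySem.Chars.lower s.toList) = 4 := by omega
    simp [h1, h2, h3, h4, h5, h6, h7, h8, h9, h10, h11, h12, h13, h14, h15, hb, pvBuckets]
  rw [Bool.not_eq_true] at h15
  by_cases h16 : PySem.Chars.isIn ['l', 'o', 'n', 'g', ' ', 't', 'e', 'r', 'm'] (PySem.Chars.lower s.toList) = true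
  · have hle := pv_best_le (PySem.Chars.lower s.toList) _ 4 (by decide) (by decide) h16
    have hge : 4 ≤ pvBest (PySem.Chars.lower s.toList) := by
      apply pv_best_ge _ 4 (by omega)
      intro tp htp hlt
      unfold pvTerms at htp
      simp only [List.mem_cons, List.not_mem_nil, or_false] at htp
      rcases htp with rfl|rfl|rfl|rfl|rfl|rfl|rfl|rfl|rfl|rfl|rfl|rfl|rfl|rfl|rfl|rfl|rfl|h
      all_goals simp_all
    have hb : pvBest (PySem.Chars.lower s.toList) = 4 := by omega
    simp [h1, h2, h3, h4, h5, h6, h7, h8, h9, h10, h11, h12, h13, h14, h15, h16, hb, pvBuckets]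
  rw [Bool.not_eq_true] at h16
  by_cases h17 : PySem.Chars.isIn ['d', 'e', 'c', 'a', 'd', 'a', 'l'] (PySem.Chars.lower s.toList) = true
  · have hle := pv_best_le (PySem.Chars.lower s.toList) _ 4 (by decide) (by decide) h17
    have hge : 4 ≤ pvBest (PySem.Chars.lower s.toList) := by
      apply pv_best_ge _ 4 (by omega)
      intro tp htp hlt
      unfold pvTerms at htp
      simp only [List.mem_cons, List.not_mem_nil, or_false] at htp
      rcases htp with rfl|rfl|rfl|rfl|rfl|rfl|rfl|rfl|rfl|rfl|rfl|rfl|rfl|rfl|rfl|rfl|rfl|h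
      all_goals simp_all
    have hb : pvBest (PySem.Chars.lower s.toList) = 4 := by omega
    simp [h1, h2, h3, h4, h5, h6, h7, h8, h9, h10, h11, h12, h13, h14, h15, h16, h17, hb, pvBuckets]
  rw [Bool.not_eq_true] at h17
  have hb : pvBest (PySem.Chars.lower s.toList) = 5 := by
    rcases pv_best_inv (PySem.Chars.lower s.toList) with h5' | ⟨tp, htp, hpv, hin⟩
    · exact h5'
    · exfalso
      unfold pvTerms at htp
      simp only [List.mem_cons, List.not_mem_nil, or_false] at htp
      rcases htp with rfl|rfl|rfl|rfl|rfl|rfl|rfl|rfl|rfl|rfl|rfl|rfl|rfl|rfl|rfl|rfl|rfl|h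
      all_goals simp_all
  simp [h1, h2, h3, h4, h5, h6, h7, h8, h9, h10, h11, h12, h13, h14, h15, h16, h17, hb, pvBuckets]
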